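-- pv_equiv track=rewrite | github.com/JingMog/RFL-MSD | test_lrc_top1top3_log.py | line_post_filter
-- ===== SOURCE A (Python) =====
-- def filter_list(in_str_list, min_dul_num = 4):
--
--     len_str = len(in_str_list)
--     max_dul = len_str // min_dul_num
--     is_del = False
--
--
--     for n_dul in range(1, max_dul, 1):
--         cur_dul_list = in_str_list[-n_dul:]
--         cur_n_dul = n_dul + n_dul
--         cur_count = 0
--         while cur_n_dul <= len_str:
--             if in_str_list[-cur_n_dul:(-cur_n_dul + n_dul)] == cur_dul_list:
--                 cur_count += 1
--                 cur_n_dul += n_dul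
--             else:
--                 break
--
--         if cur_count >= min_dul_num:
--             is_del = True
--
--             in_str_list = in_str_list[:(-cur_n_dul + n_dul)]
--             break
--
--
--     if is_del:
--         return filter_list(in_str_list)
--     else:
--         return in_str_list
--
-- def line_post_filter(rst_str_list):
--     postfix = 200
--     times = 5
--     for _ in range(times):
--         rst_str_list = filter_list(rst_str_list)
--         c_postfix = min(postfix, len(rst_str_list))
--
--         for xt in range(1, c_postfix):
--             rst_str_list = filter_list(rst_str_list[:-xt]) + rst_str_list[-xt:]
--     return rst_str_list
-- ===== SOURCE B (Python) =====
-- def _strip_rev(rev):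
--     # Works on the REVERSED token list: repeated trailing blocks of the
--     # original list are repeated leading blocks here.
--     while True:
--         L = len(rev)
--         for n in range(1, L // 4):
--             c = 1
--             while (c + 1) * n <= L and rev[c * n:(c + 1) * n] == rev[:n]:
--                 c += 1
--             if c >= 5:
--                 rev = rev[c * n:]
--                 break
--         else:
--             return rev
--
--
-- def line_post_filter(rst_str_list):
--     rev = list(reversed(rst_str_list))
--     for _ in range(5):
--         rev = _strip_rev(rev)
--         c_postfix = min(200, len(rev))
--         for xt in range(1, c_postfix):
--             rev = rev[:xt] + _strip_rev(rev[xt:])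
--     return list(reversed(rev))
-- ===== Notes on version B (the rewrite author's own statement) =====
-- stated objective: alternative
-- what changed: filter_list's tail recursion is replaced by an iterative while-True loop that works on the reversed token list, detecting repeated blocks as leading prefixes with plain non-negative take/drop arithmetic instead of negative-index slices; the list is reversed once at entry and once at exit.
import Mathlib
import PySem

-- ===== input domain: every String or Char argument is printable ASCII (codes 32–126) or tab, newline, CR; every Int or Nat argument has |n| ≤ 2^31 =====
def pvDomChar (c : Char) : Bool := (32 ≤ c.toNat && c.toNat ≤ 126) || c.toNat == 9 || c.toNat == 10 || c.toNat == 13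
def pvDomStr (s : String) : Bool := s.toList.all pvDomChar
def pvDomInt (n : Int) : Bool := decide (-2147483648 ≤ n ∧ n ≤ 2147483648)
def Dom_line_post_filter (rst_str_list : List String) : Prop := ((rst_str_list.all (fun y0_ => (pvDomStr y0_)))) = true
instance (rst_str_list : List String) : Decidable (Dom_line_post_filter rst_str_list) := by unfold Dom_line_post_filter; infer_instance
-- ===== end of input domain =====

-- B re-decomposes the trailing-repeat stripping iteratively on the REVERSED list
-- (prefix take/drop arithmetic instead of A's negative-slice tail recursion); objective: alternative.

-- ===== PORT A =====
-- the inner `while cur_n_dul <= len_str` of filter_list (fuel makes it total; len+1 always suffices)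
def pvA_while (in_str_list : List String) (len_str n_dul : Int) (cur_dul_list : List String) :
    Nat → Int → Int → Int × Int
  | 0, cur_n_dul, cur_count => (cur_n_dul, cur_count)
  | fuel+1, cur_n_dul, cur_count =>
    if cur_n_dul ≤ len_str then
      if PySem.List.slice in_str_list (some (-cur_n_dul)) (some (-cur_n_dul + n_dul)) = cur_dul_list then
        pvA_while in_str_list len_str n_dul cur_dul_list fuel (cur_n_dul + n_dul) (cur_count + 1)
      else (cur_n_dul, cur_count)
    else (cur_n_dul, cur_count)

-- the `for n_dul in range(1, max_dul, 1)` with its break; returns (in_str_list, is_del)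
def pvA_for (in_str_list : List String) (len_str min_dul_num : Int) :
    List Int → List String × Bool
  | [] => (in_str_list, false)
  | n_dul :: rest =>
    let cur_dul_list := PySem.List.slice in_str_list (some (-n_dul)) none
    let r := pvA_while in_str_list len_str n_dul cur_dul_list (in_str_list.length + 1) (n_dul + n_dul) 0
    if min_dul_num ≤ r.2 then
      (PySem.List.slice in_str_list none (some (-r.1 + n_dul)), true)
    else
      pvA_for in_str_list len_str min_dul_num rest

-- filter_list's tail recursion (each deleting pass shortens the list, so fuel len+1 suffices)
def pvA_filter_rec : Nat → List String → Int → List String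
  | 0, in_str_list, _ => in_str_list
  | fuel+1, in_str_list, min_dul_num =>
    let len_str : Int := in_str_list.length
    let max_dul := PySem.Int.floordiv len_str min_dul_num
    let r := pvA_for in_str_list len_str min_dul_num (PySem.List.pyRange 1 max_dul 1)
    if r.2 then pvA_filter_rec fuel r.1 4 else r.1

def pvA_filter_list (in_str_list : List String) (min_dul_num : Int) : List String :=
  pvA_filter_rec (in_str_list.length + 1) in_str_list min_dul_num

def line_post_filter (rst_str_list : List String) : List String :=
  (PySem.List.pyRange 0 5 1).foldl (fun rst _ =>
    let rst := pvA_filter_list rst 4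
    let c_postfix := min (200 : Int) (PySem.List.len rst)
    (PySem.List.pyRange 1 c_postfix 1).foldl (fun rst xt =>
      pvA_filter_list (PySem.List.slice rst none (some (-xt))) 4 ++
        PySem.List.slice rst (some (-xt)) none) rst) rst_str_list

-- ===== PORT B =====
-- count the consecutive leading copies of rev[:n] in rev (the inner while of _strip_rev)
def pvB_count (rev : List String) (n : Nat) : Nat → Nat → Nat
  | 0, c => c
  | fuel+1, c =>
    if (c+1)*n ≤ rev.length ∧ (rev.drop (c*n)).take n = rev.take n then
      pvB_count rev n fuel (c+1)
    else c

-- the `for n in range(1, L // 4)` with its break / else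
def pvB_scan (rev : List String) : List Nat → Option (List String)
  | [] => none
  | n :: rest =>
    let c := pvB_count rev n (rev.length + 1) 1
    if 5 ≤ c then some (rev.drop (c*n)) else pvB_scan rev rest

-- the `while True` of _strip_rev (fuel: each found repetition shortens rev)
def pvB_strip_rec : Nat → List String → List String
  | 0, rev => rev
  | fuel+1, rev =>
    match pvB_scan rev (List.range' 1 (rev.length / 4 - 1)) with
    | some rev' => pvB_strip_rec fuel rev'
    | none => rev

def pvB_strip (rev : List String) : List String := pvB_strip_rec (rev.length + 1) rev

def line_post_filter_alt (rst_str_list : List String) : List String :=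
  ((List.range 5).foldl (fun rev _ =>
    let rev := pvB_strip rev
    let c_postfix := min 200 rev.length
    (List.range' 1 (c_postfix - 1)).foldl (fun rev xt =>
      rev.take xt ++ pvB_strip (rev.drop xt)) rev) rst_str_list.reverse).reverse

-- ===== PRECONDITION & SPEC =====
def Spec_line_post_filter (rst_str_list : List String) (out : List String) : Prop := out = line_post_filter_alt rst_str_list
instance (rst_str_list : List String) (out : List String) : Decidable (Spec_line_post_filter rst_str_list out) := by unfold Spec_line_post_filter; infer_instance

-- ===== CLAIM (what is proved, stated in full; the proofs are below) =====
def Claim_equal_line_post_filter : Prop := ∀ (rst_str_list : List String), Dom_line_post_filter rst_str_list → Spec_line_post_filter rst_str_list (line_post_filter rst_str_list)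

-- ===== LEMMAS AND PROOFS =====

-- a fully negative slice xs[-(j+n):-j] is a forward segment
theorem pv_slice_neg_neg (xs : List String) (j n : Nat) (hj : 0 < j) (hL : j + n ≤ xs.length) :
    PySem.List.slice xs (some (-((j+n : Nat) : Int))) (some (-(j : Int))) =
      (xs.drop (xs.length - (j + n))).take n := by
  simp only [PySem.List.slice, PySem.List.clampIdx_neg_natCast _ _ (by omega : 0 < j + n),
    PySem.List.clampIdx_neg_natCast _ _ hj]
  congr 1
  omega

-- the inner while loops agree (A on xs with negative slices, B counting on xs.reverse)
theorem pv_while_eq (fuel : Nat) (xs : List String) (n : Nat) (hn : 1 ≤ n) :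
    ∀ (c : Nat), 1 ≤ c →
      pvA_while xs (xs.length : Int) (n : Int) (xs.drop (xs.length - n)) fuel
          (((c : Int)+1)*(n : Int)) ((c : Int)-1)
        = ((((pvB_count xs.reverse n fuel c : Nat) : Int)+1)*(n : Int),
            ((pvB_count xs.reverse n fuel c : Nat) : Int)-1) := by
  induction fuel with
  | zero => intro c hc; simp [pvA_while, pvB_count]
  | succ fuel ih =>
    intro c hc
    by_cases h1 : (c+1)*n ≤ xs.length
    · have h1' : c*n + n ≤ xs.length := by nlinarith
      have hA1 : ((c : Int)+1)*(n : Int) ≤ ((xs.length : Nat) : Int) := by exact_mod_cast h1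
      have hslice : PySem.List.slice xs (some (-(((c : Int)+1)*(n : Int))))
            (some (-(((c : Int)+1)*(n : Int)) + (n : Int)))
          = (xs.drop (xs.length - (c*n+n))).take n := by
        have e2 : -(((c : Int)+1)*(n : Int)) + (n : Int) = -((c*n : Nat) : Int) := by push_cast; ring
        have e1 : -(((c : Int)+1)*(n : Int)) = -((c*n+n : Nat) : Int) := by push_cast; ring
        rw [e2, e1, pv_slice_neg_neg xs (c*n) n (by positivity) h1']
      have hLto : (xs.take (xs.length - c*n)).length = xs.length - c*n := by
        simp [List.length_take]
      have hBlhs : (xs.reverse.drop (c*n)).take n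
          = ((xs.drop (xs.length - (c*n+n))).take n).reverse := by
        rw [List.drop_reverse, List.take_reverse, hLto, List.drop_take]
        have e5 : xs.length - c*n - n = xs.length - (c*n+n) := by omega
        have e6 : xs.length - c*n - (xs.length - (c*n + n)) = n := by omega
        rw [e5, e6]
      have hBrhs : xs.reverse.take n = (xs.drop (xs.length - n)).reverse := by
        rw [List.take_reverse]
      have hcond : ((xs.reverse.drop (c*n)).take n = xs.reverse.take n)
          ↔ ((xs.drop (xs.length - (c*n+n))).take n = xs.drop (xs.length - n)) := by
        rw [hBlhs, hBrhs, List.reverse_inj]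
      by_cases h2 : (xs.drop (xs.length - (c*n+n))).take n = xs.drop (xs.length - n)
      · have eB : pvB_count xs.reverse n (fuel+1) c = pvB_count xs.reverse n fuel (c+1) := by
          rw [pvB_count, if_pos ⟨by simpa using h1, hcond.mpr h2⟩]
        rw [eB]
        rw [pvA_while, if_pos hA1, if_pos (hslice.trans (by rw [h2]))]
        have e3 : ((c : Int)+1)*(n : Int) + (n : Int) = (((c+1 : Nat) : Int)+1)*(n : Int) := by
          push_cast; ring
        have e4 : (c : Int) - 1 + 1 = ((c+1 : Nat) : Int) - 1 := by push_cast; ring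
        rw [e3, e4]
        exact ih (c+1) (by omega)
      · have eB : pvB_count xs.reverse n (fuel+1) c = c := by
          rw [pvB_count, if_neg (fun hx => h2 (hcond.mp hx.2))]
        have h2' : ¬ (PySem.List.slice xs (some (-(((c : Int)+1)*(n : Int))))
            (some (-(((c : Int)+1)*(n : Int)) + (n : Int))) = xs.drop (xs.length - n)) := by
          rw [hslice]; exact h2
        rw [eB, pvA_while, if_pos hA1, if_neg h2']
    · have hA1 : ¬ (((c : Int)+1)*(n : Int) ≤ ((xs.length : Nat) : Int)) := by
        exact_mod_cast h1
      have eB : pvB_count xs.reverse n (fuel+1) c = c := by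
        rw [pvB_count, if_neg (fun hx => h1 (by simpa using hx.1))]
      rw [eB, pvA_while, if_neg hA1]

-- the break/else for-loops agree
theorem pv_for_eq (xs : List String) : ∀ (ns : List Nat), (∀ n ∈ ns, 1 ≤ n) →
    pvA_for xs (xs.length : Int) 4 (ns.map Int.ofNat)
      = match pvB_scan xs.reverse ns with
        | some rev' => (rev'.reverse, true)
        | none => (xs, false) := by
  intro ns
  induction ns with
  | nil => intro _; simp [pvA_for, pvB_scan]
  | cons n rest ih =>
    intro hns
    have hn : 1 ≤ n := hns n (by simp)
    have hdul : PySem.List.slice xs (some (-((n : Nat) : Int))) none = xs.drop (xs.length - n) :=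
      PySem.List.slice_from_neg_natCast xs n hn
    have e0 : (((n : Nat) : Int) + ((n : Nat) : Int)) = (((1 : Nat) : Int)+1)*(n : Int) := by
      push_cast; ring
    have hw := pv_while_eq (xs.length + 1) xs n hn 1 le_rfl
    set c' := pvB_count xs.reverse n (xs.length + 1) 1 with hc'
    simp only [pvA_for, pvB_scan, List.map_cons, Int.ofNat_eq_natCast, hdul]
    rw [e0]
    have e1 : ((1 : Nat) : Int) - 1 = (0 : Int) := by norm_num
    rw [← e1, hw]
    have hfuel : xs.reverse.length + 1 = xs.length + 1 := by simp
    rw [hfuel, ← hc']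
    by_cases h5 : 5 ≤ c'
    · have hA : (4 : Int) ≤ ((c' : Int) + 1, (c' : Int) - 1).2 := by
        simp only; omega
      rw [if_pos (by simpa using hA), if_pos h5]
      have e2 : -(((c' : Int)+1)*(n : Int)) + ((n : Nat) : Int) = -((c'*n : Nat) : Int) := by
        push_cast; ring
      rw [e2, PySem.List.slice_to_neg_natCast xs (c'*n) (Nat.mul_pos (by omega) hn)]
      have e3 : (xs.reverse.drop (c'*n)).reverse = xs.take (xs.length - c'*n) := by
        rw [List.drop_reverse, List.reverse_reverse]
      simp [e3]
    · have hA : ¬ ((4 : Int) ≤ (c' : Int) - 1) := by omega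
      rw [if_neg (by simpa using hA), if_neg h5]
      exact ih (fun m hm => hns m (by simp [hm]))

-- range(1, b) as a mapped Nat range
theorem pv_range_eq (b : Nat) :
    PySem.List.pyRange 1 (b : Int) 1 = (List.range' 1 (b - 1)).map Int.ofNat := by
  rw [PySem.List.pyRange_one]
  have hb : ((b : Int) - 1).toNat = b - 1 := by omega
  rw [hb, List.range'_eq_map_range, List.map_map]
  apply List.map_congr_left
  intro k _
  simp [Function.comp]

-- filter_list (min_dul_num = 4) agrees with _strip_rev on the reversed list
theorem pv_filter_eq (fuel : Nat) : ∀ (xs : List String),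
    pvA_filter_rec fuel xs 4 = (pvB_strip_rec fuel xs.reverse).reverse := by
  induction fuel with
  | zero => intro xs; simp [pvA_filter_rec, pvB_strip_rec]
  | succ fuel ih =>
    intro xs
    have hM : PySem.Int.floordiv ((xs.length : Nat) : Int) 4 = ((xs.length / 4 : Nat) : Int) := by
      exact_mod_cast PySem.Int.floordiv_natCast xs.length 4
    have hns : ∀ m ∈ List.range' 1 (xs.length / 4 - 1), 1 ≤ m := by
      intro m hm; exact (List.mem_range'_1.mp hm).1
    have hfor := pv_for_eq xs (List.range' 1 (xs.length / 4 - 1)) hns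
    simp only [pvA_filter_rec, pvB_strip_rec, List.length_reverse]
    rw [hM, pv_range_eq (xs.length / 4), hfor]
    cases hsc : pvB_scan xs.reverse (List.range' 1 (xs.length / 4 - 1)) with
    | none => simp
    | some rev' =>
      simp only [if_true]
      rw [ih rev'.reverse, List.reverse_reverse]

theorem pv_filter_list_eq (xs : List String) :
    pvA_filter_list xs 4 = (pvB_strip xs.reverse).reverse := by
  simpa [pvA_filter_list, pvB_strip] using pv_filter_eq (xs.length + 1) xs

-- one xt-step agrees
theorem pv_body_eq (rst : List String) (xt : Nat) (hx : 1 ≤ xt) :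
    pvA_filter_list (PySem.List.slice rst none (some (-(xt : Int)))) 4 ++
        PySem.List.slice rst (some (-(xt : Int))) none
      = (rst.reverse.take xt ++ pvB_strip (rst.reverse.drop xt)).reverse := by
  rw [PySem.List.slice_to_neg_natCast rst xt hx, PySem.List.slice_from_neg_natCast rst xt hx,
    pv_filter_list_eq, List.reverse_append, List.take_reverse, List.drop_reverse,
    List.reverse_reverse]

-- the xt-fold agrees
theorem pv_xtfold_eq : ∀ (ns : List Nat) (rst : List String), (∀ n ∈ ns, 1 ≤ n) →
    (ns.map Int.ofNat).foldl (fun rst xt =>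
        pvA_filter_list (PySem.List.slice rst none (some (-xt))) 4 ++
          PySem.List.slice rst (some (-xt)) none) rst
      = ((ns.foldl (fun rev xt => rev.take xt ++ pvB_strip (rev.drop xt)) rst.reverse)).reverse := by
  intro ns
  induction ns with
  | nil => intro rst _; simp
  | cons n rest ih =>
    intro rst hns
    have hn : 1 ≤ n := hns n (by simp)
    simp only [List.map_cons, List.foldl_cons, Int.ofNat_eq_natCast]
    rw [pv_body_eq rst n hn, ih _ (fun m hm => hns m (by simp [hm])), List.reverse_reverse]

-- one pass of the outer `for _ in range(times)` agrees
theorem pv_pass_eq (rst : List String) :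
    (PySem.List.pyRange 1 (min (200 : Int) (PySem.List.len (pvA_filter_list rst 4))) 1).foldl
        (fun rst xt =>
          pvA_filter_list (PySem.List.slice rst none (some (-xt))) 4 ++
            PySem.List.slice rst (some (-xt)) none) (pvA_filter_list rst 4)
      = ((List.range' 1 (min 200 (pvB_strip rst.reverse).length - 1)).foldl
          (fun rev xt => rev.take xt ++ pvB_strip (rev.drop xt)) (pvB_strip rst.reverse)).reverse := by
  have h1 : pvA_filter_list rst 4 = (pvB_strip rst.reverse).reverse := pv_filter_list_eq rst
  have hlen : PySem.List.len ((pvB_strip rst.reverse).reverse)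
      = (((pvB_strip rst.reverse).length : Nat) : Int) := by
    simp [PySem.List.len_eq]
  have hmin : min (200 : Int) (((pvB_strip rst.reverse).length : Nat) : Int)
      = ((min 200 (pvB_strip rst.reverse).length : Nat) : Int) := by
    omega
  have hns : ∀ m ∈ List.range' 1 (min 200 (pvB_strip rst.reverse).length - 1), 1 ≤ m := by
    intro m hm; exact (List.mem_range'_1.mp hm).1
  rw [h1, hlen, hmin, pv_range_eq, pv_xtfold_eq _ _ hns, List.reverse_reverse]

-- ===== VERDICT (by name: the statement is the Claim_ definition above) =====
theorem line_post_filter_spec : Claim_equal_line_post_filter := by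
  unfold Claim_equal_line_post_filter
  intro rst _
  unfold Spec_line_post_filter line_post_filter line_post_filter_alt
  have hA : PySem.List.pyRange 0 5 1 = ([0, 1, 2, 3, 4] : List Int) := by decide
  have hB : List.range 5 = [0, 1, 2, 3, 4] := by decide
  rw [hA, hB]
  simp only [List.foldl_cons, List.foldl_nil]
  simp only [pv_pass_eq, List.reverse_reverse]
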